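-- pv_equiv track=rewrite | github.com/Vedaang-Chopra/Python_Codes_Practiced | f-17.py | rowsum
-- ===== SOURCE A (Python) =====
-- def rowsum(arr,n,m):
--     row=[]
--     s=0
--     for i in range(0,n):
--         s=0
--         for j in range(0,m):
--             s=s+arr[i][j]
--         row.append(s)
--     val=max(row)
--     for i in range(0,len(row)):
--         if(row[i]==val):
--             return i,val
-- ===== SOURCE B (Python) =====
-- def rowsum(arr, n, m):
--     # Single fused pass: keep (best_i, best_v) while scanning, instead of
--     # building the full row-sum list, calling max() and re-scanning for the
--     # index.  Strict '>' preserves the first-maximum tie rule.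
--     best_i = None
--     best_v = None
--     for i in range(n):
--         s = sum(arr[i][j] for j in range(m))
--         if best_v is None or s > best_v:
--             best_i, best_v = i, s
--     if best_v is None:
--         raise ValueError("max() arg is an empty sequence")
--     return best_i, best_v
-- ===== Notes on version B (the rewrite author's own statement) =====
-- stated objective: simpler
-- what changed: Single fused pass maintaining (best_i, best_v) with a None sentinel and strict '>', instead of A's three phases: build the full row-sum list, call max(), then re-scan the list for the first index of the maximum.
import Mathlib
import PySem

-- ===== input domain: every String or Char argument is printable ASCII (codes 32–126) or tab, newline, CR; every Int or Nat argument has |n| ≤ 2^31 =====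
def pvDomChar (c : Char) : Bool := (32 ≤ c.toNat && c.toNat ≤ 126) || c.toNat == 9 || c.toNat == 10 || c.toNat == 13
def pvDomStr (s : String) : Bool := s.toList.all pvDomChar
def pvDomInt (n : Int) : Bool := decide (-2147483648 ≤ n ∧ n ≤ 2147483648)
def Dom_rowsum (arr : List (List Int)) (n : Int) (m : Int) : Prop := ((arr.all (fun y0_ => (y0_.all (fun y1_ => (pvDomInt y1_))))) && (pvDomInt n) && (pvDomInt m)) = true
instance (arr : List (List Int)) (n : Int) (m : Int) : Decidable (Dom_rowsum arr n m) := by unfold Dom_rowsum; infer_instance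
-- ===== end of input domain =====

-- B replaces A's build-row-sum-list / max() / rescan-for-index pipeline by a single pass
-- keeping (best_idx, best_val); objective: simpler (O(1) extra space instead of O(n)).

-- ===== PORT A =====
-- row=[...]: append one inner-loop sum per i in range(0,n)
-- (the Python list with its O(1) .append is modelled by an Array with push)
def rowsumRow (arr : List (List Int)) (n : Int) (m : Int) : List Int :=
  ((PySem.List.pyRange 0 n 1).foldl
    (fun row i =>
      row.push ((PySem.List.pyRange 0 m 1).foldl
        (fun s j => s + PySem.List.pyGetD (PySem.List.pyGetD arr i []) j 0) 0))
    (#[] : Array Int)).toList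

-- final loop: 'for i in range(0,len(row)): if row[i]==val: return i,val'
-- ([] case unreachable: val = max(row) is a member of row; Python would fall off and return None)
def rowsumFind : List Int → Int → Int → Int × Int
  | [], val, _ => (0, val)
  | x :: xs, val, i => if x = val then (i, val) else rowsumFind xs val (i + 1)

def rowsum (arr : List (List Int)) (n : Int) (m : Int) : Int × Int :=
  match PySem.List.max? (rowsumRow arr n m) (fun y => y) with
  | none => (0, 0)      -- unreachable under Pre_: max([]) raises ValueError, excluded by Pre_
  | some val => rowsumFind (rowsumRow arr n m) val 0

-- ===== PORT B =====
-- s = sum(arr[i][j] for j in range(m))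
def rowsumAltRsum (arr : List (List Int)) (m : Int) (i : Int) : Int :=
  ((PySem.List.pyRange 0 m 1).map
    (fun j => PySem.List.pyGetD (PySem.List.pyGetD arr i []) j 0)).sum

def rowsum_alt (arr : List (List Int)) (n : Int) (m : Int) : Int × Int :=
  match (PySem.List.pyRange 0 n 1).foldl
      (fun best i =>
        let s := rowsumAltRsum arr m i
        match best.2 with
        | none => (some i, some s)
        | some bv => if s > bv then (some i, some s) else best)
      ((none : Option Int), (none : Option Int)) with
  | (some bi, some bv) => (bi, bv)
  | _ => (0, 0)   -- unreachable under Pre_ (1 ≤ n): 'best_v is None' → Python raises ValueError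

-- ===== PRECONDITION & SPEC =====
-- Pre_ excludes exactly the inputs where A raises: n < 1 (max([]) raises ValueError),
-- and, when m > 0 (only then is arr[i][j] ever evaluated), n > len(arr) or
-- m > len(arr[i]) for some scanned row (IndexError).
def Pre_rowsum (arr : List (List Int)) (n : Int) (m : Int) : Prop :=
  1 ≤ n ∧ (0 < m → n ≤ (arr.length : Int) ∧ ∀ r ∈ arr.take n.toNat, m ≤ (r.length : Int))
instance (arr : List (List Int)) (n : Int) (m : Int) : Decidable (Pre_rowsum arr n m) := by
  unfold Pre_rowsum; infer_instance

def pvWitness_rowsum : List (List Int) × Int × Int := ([[1, 2], [3, 4]], 2, 2)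

def Spec_rowsum (arr : List (List Int)) (n : Int) (m : Int) (out : Int × Int) : Prop := out = rowsum_alt arr n m
instance (arr : List (List Int)) (n : Int) (m : Int) (out : Int × Int) : Decidable (Spec_rowsum arr n m out) := by unfold Spec_rowsum; infer_instance

-- ===== CLAIM (what is proved, stated in full; the proofs are below) =====
def Claim_equal_rowsum : Prop := ∀ (arr : List (List Int)) (n : Int) (m : Int), Dom_rowsum arr n m → Pre_rowsum arr n m → Spec_rowsum arr n m (rowsum arr n m)

-- ===== LEMMAS AND PROOFS =====

-- first-maximum of a list: fm L = some (index of the first maximum, its value), none on []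
def fm : List Int → Option (Int × Int)
  | [] => none
  | x :: xs =>
    match fm xs with
    | none => some (0, x)
    | some (j, w) => if w > x then some (j + 1, w) else some (0, x)

lemma foldl_push_toList {α β : Type} (f : α → β) :
    ∀ (l : List α) (acc : Array β),
      (l.foldl (fun a x => a.push (f x)) acc).toList = acc.toList ++ l.map f := by
  intro l
  induction l with
  | nil => intro acc; simp
  | cons x xs ih =>
    intro acc
    simp [ih]

lemma fm_spec : ∀ (L : List Int) (j w : Int), fm L = some (j, w) →
    (∀ x ∈ L, x ≤ w) ∧ w ∈ L ∧ (∀ i : Int, rowsumFind L w i = (i + j, w)) := by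
  intro L
  induction L with
  | nil => intro j w h; simp [fm] at h
  | cons x xs ih =>
    intro j w h
    cases hxs : fm xs with
    | none =>
      cases xs with
      | nil =>
        simp [fm] at h
        obtain ⟨hj, hw⟩ := h
        subst hj hw
        refine ⟨by simp, by simp, ?_⟩
        intro i; simp [rowsumFind]
      | cons y ys => simp [fm] at hxs; cases hys : fm ys <;> simp [hys] at hxs <;> split at hxs <;> simp at hxs
    | some p =>
      obtain ⟨j', w'⟩ := p
      obtain ⟨hb, hmem, hfind⟩ := ih j' w' hxs
      simp only [fm, hxs] at h
      by_cases hgt : w' > x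
      · rw [if_pos hgt] at h
        rw [Option.some.injEq, Prod.mk.injEq] at h
        obtain ⟨hj, hw⟩ := h
        subst hw
        refine ⟨?_, by simp [hmem], ?_⟩
        · intro z hz
          rcases List.mem_cons.mp hz with h2 | h2
          · omega
          · exact hb z h2
        · intro i
          have hx : x ≠ w' := by omega
          simp only [rowsumFind, if_neg hx]
          rw [hfind (i + 1)]
          have h5 : i + 1 + j' = i + j := by omega
          rw [h5]
      · rw [if_neg hgt] at h
        rw [Option.some.injEq, Prod.mk.injEq] at h
        obtain ⟨hj, hw⟩ := h
        subst hw
        refine ⟨?_, by simp, ?_⟩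
        · intro z hz
          rcases List.mem_cons.mp hz with h2 | h2
          · omega
          · have := hb z h2; omega
        · intro i
          simp only [rowsumFind, if_pos]
          have h5 : i + j = i := by omega
          rw [h5]

lemma foldl_max_le : ∀ (t : List Int) (x w : Int), x ≤ w → (∀ y ∈ t, y ≤ w) → t.foldl max x ≤ w := by
  intro t
  induction t with
  | nil => intro x w h _; simpa using h
  | cons y ys ih =>
    intro x w hx hall
    simp only [List.foldl_cons]
    exact ih _ _ (max_le hx (hall y (by simp))) (fun z hz => hall z (by simp [hz]))

lemma fm_max (L : List Int) (x : Int) (t : List Int) (j w : Int)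
    (hL : L = x :: t) (h : fm L = some (j, w)) : t.foldl max x = w := by
  obtain ⟨hb, hmem, -⟩ := fm_spec L j w h
  subst hL
  have h1 := PySem.List.le_foldl_max t x
  apply le_antisymm
  · exact foldl_max_le t x w (hb x (by simp)) (fun y hy => hb y (by simp [hy]))
  · rcases List.mem_cons.mp hmem with h2 | h2
    · exact h2 ▸ h1.1
    · exact h1.2 w h2

lemma altfold_aux (g : Int → Int) (b : Int) :
    ∀ (k : Nat) (a bi bv : Int), (b - a).toNat ≤ k →
    (PySem.List.pyRange a b 1).foldl
        (fun best i =>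
          let s := g i
          match best.2 with
          | none => (some i, some s)
          | some bv' => if s > bv' then (some i, some s) else best)
        ((some bi : Option Int), (some bv : Option Int))
      = (match fm ((PySem.List.pyRange a b 1).map g) with
        | none => (some bi, some bv)
        | some (j, w) => if w > bv then (some (a + j), some w) else (some bi, some bv)) := by
  intro k
  induction k with
  | zero =>
    intro a bi bv h
    rw [PySem.List.pyRange_one_eq_nil (by omega)]
    simp [fm]
  | succ k ih =>
    intro a bi bv h
    by_cases hab : b ≤ a
    · rw [PySem.List.pyRange_one_eq_nil hab]; simp [fm]
    · push_neg at hab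
      rw [PySem.List.pyRange_one_cons hab]
      simp only [List.foldl_cons, List.map_cons]
      by_cases h1 : g a > bv
      · simp only [h1, if_pos]
        rw [ih (a + 1) a (g a) (by omega)]
        cases hrest : fm ((PySem.List.pyRange (a + 1) b 1).map g) with
        | none => simp [fm, hrest, h1]
        | some p =>
          obtain ⟨j, w⟩ := p
          simp only [fm, hrest]
          by_cases h2 : w > g a
          · have h3 : w > bv := by omega
            simp only [h2, if_pos, h3, ite_true]
            simp only [Prod.mk.injEq, Option.some.injEq, and_true]
            omega
          · simp [h2, h1]
      · simp only [if_neg h1]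
        rw [ih (a + 1) bi bv (by omega)]
        cases hrest : fm ((PySem.List.pyRange (a + 1) b 1).map g) with
        | none => simp [fm, hrest, h1]
        | some p =>
          obtain ⟨j, w⟩ := p
          simp only [fm, hrest]
          by_cases h2 : w > g a
          · simp only [h2, ite_true]
            by_cases h3 : w > bv
            · simp only [h3, ite_true, Prod.mk.injEq, Option.some.injEq, and_true]
              omega
            · simp [h3]
          · have h3 : ¬ w > bv := by omega
            simp [h2, h3, h1]

-- ===== VERDICT (by name: the statement is the Claim_ definition above) =====
theorem rowsum_spec : Claim_equal_rowsum := by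
  intro arr n m _ hpre
  obtain ⟨hn, -⟩ := hpre
  unfold Spec_rowsum
  have hrow : rowsumRow arr n m = (PySem.List.pyRange 0 n 1).map (rowsumAltRsum arr m) := by
    unfold rowsumRow
    rw [foldl_push_toList]
    simp only [Array.toList_empty, List.nil_append]
    apply List.map_congr_left
    intro i _
    show _ = rowsumAltRsum arr m i
    unfold rowsumAltRsum
    rw [PySem.List.foldl_add]
    simp
  have hcons : PySem.List.pyRange 0 n 1 = 0 :: PySem.List.pyRange 1 n 1 := by
    have h := PySem.List.pyRange_one_cons (a := 0) (b := n) (by omega)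
    simpa using h
  set g := rowsumAltRsum arr m with hg
  set ss := (PySem.List.pyRange 1 n 1).map g with hss
  have hrow2 : rowsumRow arr n m = g 0 :: ss := by
    rw [hrow, hcons, List.map_cons]
  have hB : rowsum_alt arr n m = (match fm ss with
      | none => (0, g 0)
      | some (j, w) => if w > g 0 then (1 + j, w) else (0, g 0)) := by
    unfold rowsum_alt
    rw [hcons]
    simp only [List.foldl_cons]
    rw [altfold_aux g n (n - 1).toNat 1 0 (g 0) (le_refl _)]
    cases hss2 : fm ss with
    | none => rfl
    | some p =>
      obtain ⟨j, w⟩ := p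
      by_cases hw : w > g 0
      · simp [hw]
      · simp [hw]
  cases hss2 : fm ss with
  | none =>
    have hfm : fm (g 0 :: ss) = some (0, g 0) := by simp [fm, hss2]
    obtain ⟨-, -, hfind⟩ := fm_spec _ _ _ hfm
    have hmax : PySem.List.max? (g 0 :: ss) (fun y => y) = some (g 0) := by
      rw [PySem.List.max?_id_cons, fm_max (g 0 :: ss) (g 0) ss 0 (g 0) rfl hfm]
    unfold rowsum
    rw [hrow2, hmax]
    simp only
    rw [hfind 0, hB, hss2]
    norm_num
  | some p =>
    obtain ⟨j, w⟩ := p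
    by_cases hw : w > g 0
    · have hfm : fm (g 0 :: ss) = some (j + 1, w) := by simp [fm, hss2, hw]
      obtain ⟨-, -, hfind⟩ := fm_spec _ _ _ hfm
      have hmax : PySem.List.max? (g 0 :: ss) (fun y => y) = some w := by
        rw [PySem.List.max?_id_cons, fm_max (g 0 :: ss) (g 0) ss (j + 1) w rfl hfm]
      unfold rowsum
      rw [hrow2, hmax]
      simp only
      rw [hfind 0, hB, hss2]
      simp only [hw, ite_true, Prod.mk.injEq, and_true]
      omega
    · have hfm : fm (g 0 :: ss) = some (0, g 0) := by simp [fm, hss2, hw]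
      obtain ⟨-, -, hfind⟩ := fm_spec _ _ _ hfm
      have hmax : PySem.List.max? (g 0 :: ss) (fun y => y) = some (g 0) := by
        rw [PySem.List.max?_id_cons, fm_max (g 0 :: ss) (g 0) ss 0 (g 0) rfl hfm]
      unfold rowsum
      rw [hrow2, hmax]
      simp only
      rw [hfind 0, hB, hss2]
      simp [hw]
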